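-- pv_equiv track=rewrite | github.com/Acrisel/projenv | environ/packageenv/cast_value.py | make_xml_text_code
-- ===== SOURCE A (Python) =====
-- def make_xml_text_code(text):
--     lines_old =  text.splitlines()
--     lj=None
--     lines = []
--     for line in lines_old:
--         if line.strip() == '':
--             continue
--         if lj is None:
--             line_lj = line.lstrip(' ')
--             lj = len(line) - len(line_lj)
--         code=line[lj:]
--         lines.append(code + '\n')
--     return '\n'.join(lines)
-- ===== SOURCE B (Python) =====
-- def make_xml_text_code(text):
--     return _go(text.splitlines(), None)
--
-- def _go(lines, lj):
--     if not lines: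
--         return ''
--     head, rest = lines[0], lines[1:]
--     if head.strip() == '':
--         return _go(rest, lj)
--     if lj is None:
--         lj = len(head) - len(head.lstrip(' '))
--     tail = _go(rest, lj)
--     return head[lj:] + '\n' + ('\n' + tail if tail else '')
-- ===== Notes on version B (the rewrite author's own statement) =====
-- stated objective: alternative
-- what changed: Replaces A's iterative accumulate-then-join (a list of pieces built in a loop, then '\n'.join) by a single recursive descent over the lines that builds the output string directly back-to-front, deciding the separator from whether the recursive tail is empty, with no intermediate list and no join.
import Mathlib
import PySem

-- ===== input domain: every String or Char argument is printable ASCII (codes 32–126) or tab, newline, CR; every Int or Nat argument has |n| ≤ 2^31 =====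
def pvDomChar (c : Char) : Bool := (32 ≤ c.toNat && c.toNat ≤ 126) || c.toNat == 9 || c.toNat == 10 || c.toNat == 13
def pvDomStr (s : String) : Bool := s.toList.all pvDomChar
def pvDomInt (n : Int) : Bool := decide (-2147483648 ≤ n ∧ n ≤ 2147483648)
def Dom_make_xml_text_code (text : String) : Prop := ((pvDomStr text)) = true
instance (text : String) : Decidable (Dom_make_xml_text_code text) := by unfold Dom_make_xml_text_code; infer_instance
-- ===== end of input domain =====

-- B replaces A's accumulate-then-join loop by a single recursive descent over the lines,
-- building the output directly and choosing the separator from the emptiness of the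
-- recursive tail (objective: alternative decomposition, no intermediate list, no join).


-- ===== PORT A =====
-- one loop step of A: skip blank lines; fix lj at the first kept line; append line[lj:] + '\n'
-- (line.lstrip(' ') ported by hand as dropWhile (· == ' '): exact, lstrip with chars=' '
-- removes exactly the leading spaces)
def pvStepA (st : Option Nat × List (List Char)) (line : List Char) : Option Nat × List (List Char) :=
  if PySem.Chars.strip line == [] then st
  else
    let lj : Nat :=
      match st.1 with
      | some j => j
      | none => line.length - (line.dropWhile (· == ' ')).length
    (some lj, st.2 ++ [PySem.List.slice line (some (lj : Int)) none ++ ['\n']])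

def make_xml_text_code (text : String) : String :=
  let lines_old := PySem.Chars.splitlines text.toList
  let st := lines_old.foldl pvStepA (none, [])
  String.ofList (PySem.Chars.join ['\n'] st.2)

-- ===== PORT B =====
-- recursive helper _go of Source B: head/rest recursion, separator chosen from tail's emptiness
def pvGo (lines : List (List Char)) (lj : Option Nat) : List Char :=
  match lines with
  | [] => []
  | head :: rest =>
    if PySem.Chars.strip head == [] then pvGo rest lj
    else
      let j : Nat :=
        match lj with
        | some j => j
        | none => head.length - (head.dropWhile (· == ' ')).length
      let tail := pvGo rest (some j)
      PySem.List.slice head (some (j : Int)) none ++ ['\n'] ++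
        (if tail == [] then [] else '\n' :: tail)

def make_xml_text_code_alt (text : String) : String :=
  String.ofList (pvGo (PySem.Chars.splitlines text.toList) none)

-- ===== PRECONDITION & SPEC =====
def Spec_make_xml_text_code (text : String) (out : String) : Prop := out = make_xml_text_code_alt text
instance (text : String) (out : String) : Decidable (Spec_make_xml_text_code text out) := by unfold Spec_make_xml_text_code; infer_instance

-- ===== CLAIM (what is proved, stated in full; the proofs are below) =====
def Claim_equal_make_xml_text_code : Prop := ∀ (text : String), Dom_make_xml_text_code text → Spec_make_xml_text_code text (make_xml_text_code text)

-- ===== LEMMAS AND PROOFS =====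

-- the piece a kept line contributes, and the kept-line predicate
def pvPiece (j : Nat) (l : List Char) : List Char :=
  PySem.List.slice l (some (j : Int)) none ++ ['\n']

def pvKept (l : List Char) : Bool := PySem.Chars.strip l != []

-- joining a nonempty list of pieces is never empty (each piece ends with '\n')
theorem pvJoin_pieces_ne_nil (j : Nat) (l : List Char) (ls : List (List Char)) :
    PySem.Chars.join ['\n'] ((l :: ls).map (pvPiece j)) ≠ [] := by
  cases ls with
  | nil => simp [PySem.Chars.join_singleton, pvPiece]
  | cons r rs => simp [PySem.Chars.join_cons_cons, pvPiece]

-- once lj is fixed, B's recursion produces exactly the join of the filtered, mapped rest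
theorem pvGo_some (ls : List (List Char)) (j : Nat) :
    pvGo ls (some j) = PySem.Chars.join ['\n'] ((ls.filter pvKept).map (pvPiece j)) := by
  induction ls with
  | nil => simp [pvGo]
  | cons l ls ih =>
    by_cases h : PySem.Chars.strip l = []
    · have hb : pvKept l = false := by simp [pvKept, h]
      simpa [pvGo, h, List.filter_cons, hb] using ih
    · have hb : pvKept l = true := by simp [pvKept, h]
      simp only [pvGo, List.filter_cons, hb, if_true]
      rw [ih]
      cases hf : ls.filter pvKept with
      | nil => simp [PySem.Chars.join_singleton, pvPiece, h]
      | cons r rs =>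
        have hne := pvJoin_pieces_ne_nil j r rs
        simp [PySem.Chars.join_cons_cons, pvPiece, h] at hne ⊢
        simp [hne]

-- B's recursion from lj = None, characterised by the filtered list
theorem pvGo_none (ls : List (List Char)) :
    pvGo ls none =
      match ls.filter pvKept with
      | [] => []
      | l0 :: _ =>
        PySem.Chars.join ['\n'] ((ls.filter pvKept).map
          (pvPiece (l0.length - (l0.dropWhile (· == ' ')).length))) := by
  induction ls with
  | nil => simp [pvGo]
  | cons l ls ih =>
    by_cases h : PySem.Chars.strip l = []
    · have hb : pvKept l = false := by simp [pvKept, h]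
      simpa [pvGo, h, List.filter_cons, hb] using ih
    · have hb : pvKept l = true := by simp [pvKept, h]
      simp only [pvGo, List.filter_cons, hb, if_true]
      rw [pvGo_some]
      cases hf : ls.filter pvKept with
      | nil => simp [PySem.Chars.join_singleton, pvPiece, h]
      | cons r rs =>
        have hne := pvJoin_pieces_ne_nil (l.length - (l.dropWhile (· == ' ')).length) r rs
        simp [PySem.Chars.join_cons_cons, pvPiece, h] at hne ⊢
        simp [hne]

-- once lj is fixed (state = some j), A's loop appends exactly the filtered-and-mapped rest
theorem pvFoldA_some (ls : List (List Char)) (j : Nat) (acc : List (List Char)) :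
    ls.foldl pvStepA (some j, acc) =
      (some j, acc ++ (ls.filter pvKept).map (pvPiece j)) := by
  induction ls generalizing acc with
  | nil => simp
  | cons l ls ih =>
    simp only [List.foldl_cons, List.filter_cons]
    by_cases h : PySem.Chars.strip l = []
    · have hb : pvKept l = false := by simp [pvKept, h]
      simp [pvStepA, h, hb, ih]
    · have hb : pvKept l = true := by simp [pvKept, h]
      simp [pvStepA, h, hb, ih, pvPiece]

-- A's whole loop from the initial state, characterised by the filtered list
theorem pvFoldA_none (ls : List (List Char)) :
    (ls.foldl pvStepA (none, [])).2 =
      match ls.filter pvKept with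
      | [] => []
      | l0 :: _ =>
        (ls.filter pvKept).map (pvPiece (l0.length - (l0.dropWhile (· == ' ')).length)) := by
  induction ls with
  | nil => simp
  | cons l ls ih =>
    by_cases h : PySem.Chars.strip l = []
    · have hb : pvKept l = false := by simp [pvKept, h]
      simpa [pvStepA, h, hb, List.filter_cons] using ih
    · have hb : pvKept l = true := by simp [pvKept, h]
      have hstep : pvStepA (none, []) l =
          (some (l.length - (l.dropWhile (· == ' ')).length),
           [pvPiece (l.length - (l.dropWhile (· == ' ')).length) l]) := by
        simp [pvStepA, h, pvPiece]
      simp only [List.foldl_cons, hstep, List.filter_cons, hb, if_true]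
      rw [pvFoldA_some]
      simp

-- ===== VERDICT (by name: the statement is the Claim_ definition above) =====
theorem make_xml_text_code_spec : Claim_equal_make_xml_text_code := by
  intro text _
  show make_xml_text_code text = make_xml_text_code_alt text
  simp only [make_xml_text_code, make_xml_text_code_alt]
  rw [pvFoldA_none, pvGo_none]
  cases h : (PySem.Chars.splitlines text.toList).filter pvKept with
  | nil => simp
  | cons l0 rest => simp
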